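-- pv_equiv track=rewrite | github.com/LeeJuOh/coding-test | greedy/baekjoon/17828.py | solution
-- ===== SOURCE A (Python) =====
-- def solution(length: int, value: int) -> str:
--     if(value > 26 * length or value < length):
--         return "!"
--
--     base = ord("A")
--     result = []
--     while(value > 26 + length - 1):
--         length -= 1
--         value -= 26
--         result.append("Z")
--     target = value - length
--     result.append(chr(base + target))
--     for _ in range(length-1):
--         result.append("A")
--     return ''.join(result[::-1])
-- ===== SOURCE B (Python) =====
-- def solution(length: int, value: int) -> str:
--     if value > 26 * length or value < length:
--         return "!"
--     z = max(0, -(-(value - length - 25) // 25))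
--     t = value - length - 25 * z
--     return "A" * (length - z - 1) + chr(ord("A") + t) + "Z" * z
-- ===== Notes on version B (the rewrite author's own statement) =====
-- stated objective: simpler
-- what changed: A's countdown while-loop (decrement length, subtract 26, append 'Z' per iteration) and reversed list join are replaced by a closed-form ceiling-division computation of the number of trailing 'Z's, building the answer directly as 'A'*(length-z-1) + chr(ord('A')+t) + 'Z'*z.
import Mathlib
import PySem

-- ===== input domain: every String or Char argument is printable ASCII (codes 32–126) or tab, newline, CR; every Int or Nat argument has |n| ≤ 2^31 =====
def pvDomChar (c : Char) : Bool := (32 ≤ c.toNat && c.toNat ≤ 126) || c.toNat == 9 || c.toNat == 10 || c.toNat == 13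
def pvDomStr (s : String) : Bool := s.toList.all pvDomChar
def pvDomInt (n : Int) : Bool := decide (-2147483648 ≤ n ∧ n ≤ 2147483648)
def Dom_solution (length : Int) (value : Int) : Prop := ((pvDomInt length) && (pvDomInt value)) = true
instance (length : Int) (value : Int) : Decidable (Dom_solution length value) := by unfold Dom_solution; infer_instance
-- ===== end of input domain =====

-- B replaces A's countdown while-loop by a closed-form ceiling-division derivation of the
-- same prefix/middle/suffix decomposition (objective: simpler).

-- ===== PORT A =====
-- the while-loop of A: while value > 26 + length - 1: length -= 1; value -= 26; result.append("Z")
def solutionLoopA (length : Int) (value : Int) (result : List String) : Int × Int × List String :=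
  if value > 26 + length - 1 then
    solutionLoopA (length - 1) (value - 26) (result ++ ["Z"])
  else (length, value, result)
termination_by (value - length).toNat
decreasing_by omega

def solution (length : Int) (value : Int) : String :=
  if value > 26 * length ∨ value < length then "!"
  else
    -- base = ord("A") = 65
    let s := solutionLoopA length value []
    let target := s.2.1 - s.1
    -- chr(base + target): exact here since on every input reaching this branch 0 ≤ target ≤ 25
    let result := s.2.2 ++ [String.ofList [Char.ofNat (65 + target).toNat]]
    -- for _ in range(length-1): result.append("A")
    let result := result ++ List.replicate (s.1 - 1).toNat "A"
    PySem.Str.join "" result.reverse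

-- ===== PORT B =====
def solution_alt (length : Int) (value : Int) : String :=
  if value > 26 * length ∨ value < length then "!"
  else
    let z := max 0 (-(PySem.Int.floordiv (-(value - length - 25)) 25))
    let t := value - length - 25 * z
    -- "A" * (length - z - 1) + chr(ord("A") + t) + "Z" * z  (Python's negative repeat = "")
    String.ofList (List.replicate (length - z - 1).toNat 'A'
      ++ [Char.ofNat (65 + t).toNat] ++ List.replicate z.toNat 'Z')

-- ===== PRECONDITION & SPEC =====
def Spec_solution (length : Int) (value : Int) (out : String) : Prop := out = solution_alt length value
instance (length : Int) (value : Int) (out : String) : Decidable (Spec_solution length value out) := by unfold Spec_solution; infer_instance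

-- ===== CLAIM (what is proved, stated in full; the proofs are below) =====
def Claim_equal_solution : Prop := ∀ (length : Int) (value : Int), Dom_solution length value → Spec_solution length value (solution length value)

-- ===== LEMMAS AND PROOFS =====

-- abbreviation for B's z, used only in the proofs below
def zOf (length : Int) (value : Int) : Int :=
  max 0 (-(PySem.Int.floordiv (-(value - length - 25)) 25))

-- characterisation of A's loop by B's closed form
lemma loopA_eq : ∀ (n : Nat) (length value : Int), (value - length).toNat ≤ n →
    ∀ (res : List String),
      solutionLoopA length value res =
        (length - zOf length value, value - 26 * zOf length value,
         res ++ List.replicate (zOf length value).toNat "Z") := by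
  intro n
  induction n with
  | zero =>
    intro length value hle res
    have hz : zOf length value = 0 := by
      have h0 : 0 ≤ PySem.Int.floordiv (-(value - length - 25)) 25 := by
        rw [PySem.Int.le_floordiv_iff_mul_le (by omega)]; omega
      unfold zOf; omega
    rw [solutionLoopA, if_neg (by omega), hz]
    simp
  | succ n ih =>
    intro length value hle res
    by_cases h : value > 26 + length - 1
    · set c := -(PySem.Int.floordiv (-(value - length - 25)) 25) with hc
      have hcb : (c - 1) * 25 < value - length - 25 ∧ value - length - 25 ≤ c * 25 :=
        (PySem.Int.neg_floordiv_neg_eq_iff_of_pos (by omega)).mp hc.symm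
      set c' := -(PySem.Int.floordiv (-(value - 26 - (length - 1) - 25)) 25) with hc'
      have hcb' : (c' - 1) * 25 < value - 26 - (length - 1) - 25 ∧
          value - 26 - (length - 1) - 25 ≤ c' * 25 :=
        (PySem.Int.neg_floordiv_neg_eq_iff_of_pos (by omega)).mp hc'.symm
      have hstep : zOf length value = zOf (length - 1) (value - 26) + 1 := by
        unfold zOf; rw [← hc, ← hc']; omega
      rw [solutionLoopA, if_pos h, ih (length - 1) (value - 26) (by omega), hstep]
      have htn : (zOf (length - 1) (value - 26) + 1).toNat
          = (zOf (length - 1) (value - 26)).toNat + 1 := by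
        unfold zOf at *; omega
      rw [htn]
      simp only [Prod.mk.injEq]
      refine ⟨by omega, by omega, ?_⟩
      simp [List.replicate_succ, List.append_assoc]
    · have hz : zOf length value = 0 := by
        have h0 : 0 ≤ PySem.Int.floordiv (-(value - length - 25)) 25 := by
          rw [PySem.Int.le_floordiv_iff_mul_le (by omega)]; omega
        unfold zOf; omega
      rw [solutionLoopA, if_neg h, hz]
      simp

-- joining the reversed list of singleton strings built by A yields B's char list
lemma join_parts (k z : Nat) (c : Char) :
    PySem.Str.join ""
      ((List.replicate z "Z" ++ [String.ofList [c]] ++ List.replicate k "A").reverse)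
      = String.ofList (List.replicate k 'A' ++ [c] ++ List.replicate z 'Z') := by
  apply String.toList_inj.mp
  have h : ((List.replicate z "Z" ++ [String.ofList [c]] ++ List.replicate k "A").reverse).map
        String.toList
      = (List.replicate k 'A' ++ [c] ++ List.replicate z 'Z').map (fun ch => [ch]) := by
    simp [List.reverse_append, List.map_replicate]
  simp only [pysem, String.toList_ofList]
  rw [h]
  exact PySem.Chars.join_nil_singletons _

-- ===== VERDICT (by name: the statement is the Claim_ definition above) =====
theorem solution_spec : Claim_equal_solution := by
  intro length value _
  unfold Spec_solution solution solution_alt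
  by_cases hg : value > 26 * length ∨ value < length
  · rw [if_pos hg, if_pos hg]
  · rw [if_neg hg, if_neg hg]
    rw [loopA_eq (value - length).toNat length value le_rfl []]
    show PySem.Str.join "" _ = _
    have ht : value - 26 * zOf length value - (length - zOf length value)
        = value - length - 25 * zOf length value := by ring
    rw [ht]
    have := join_parts ((length - zOf length value) - 1).toNat (zOf length value).toNat
      (Char.ofNat (65 + (value - length - 25 * zOf length value)).toNat)
    simpa [zOf, List.nil_append] using this
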